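-- pv_equiv track=rewrite | github.com/rmura498/various-exercise | various/palindrome.py | create_palindrome3
-- ===== SOURCE A (Python) =====
-- def reverse_string(string):
--     rev_string = ''
--     for character in string:
--         rev_string = character + rev_string
--     return rev_string
--
-- def create_palindrome3(string):
--     if is_palindrome(string):
--         return string
--     other_string = ''
--     for idx in range(len(string)):
--
--         s_pal = string[:idx]
--         if is_palindrome(s_pal):
--             palindrome_part=s_pal
--             i=idx
--
--
--     rev_string = reverse_string(string[i:])
--     return rev_string + palindrome_part+string[i:]
--
-- def is_palindrome(string):  # retunr s==s[::-1]
--     rev_string = reverse_string(string)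
--     if bool(string.count(rev_string)):
--         return True
--     return False
-- ===== SOURCE B (Python) =====
-- def create_palindrome3(string):
--     # Simpler/faster: scan prefix lengths downward and stop at the first
--     # (= longest) palindromic proper prefix, then prepend the reversed suffix.
--     if string == string[::-1]:
--         return string
--     i = len(string) - 1
--     while string[:i] != string[:i][::-1]:
--         i -= 1
--     return string[i:][::-1] + string
-- ===== Notes on version B (the rewrite author's own statement) =====
-- stated objective: faster
-- what changed: A scans all prefixes upward, testing each with a reverse-and-count palindrome check and keeping the last hit; B scans prefix lengths downward with a direct slice comparison and stops at the first palindromic proper prefix, then returns reversed-suffix + original string.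
import Mathlib
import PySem

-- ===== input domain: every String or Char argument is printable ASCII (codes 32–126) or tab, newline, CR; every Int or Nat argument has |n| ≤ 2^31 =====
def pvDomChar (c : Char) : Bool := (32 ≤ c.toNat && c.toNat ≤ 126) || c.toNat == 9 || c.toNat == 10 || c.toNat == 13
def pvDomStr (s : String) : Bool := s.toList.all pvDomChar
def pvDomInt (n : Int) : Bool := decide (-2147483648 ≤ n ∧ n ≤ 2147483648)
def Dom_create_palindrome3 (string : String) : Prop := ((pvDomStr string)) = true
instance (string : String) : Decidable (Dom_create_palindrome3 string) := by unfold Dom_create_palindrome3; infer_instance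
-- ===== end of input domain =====

-- B changes the search: it scans prefix lengths downward and stops at the first
-- (= longest) palindromic proper prefix, instead of A's upward scan over every
-- prefix with a reverse-and-count palindrome test; objective: faster by early exit.

-- ===== PORT A =====
def reverse_string_chars (s : List Char) : List Char :=
  s.foldl (fun rev c => c :: rev) []

def is_palindrome_chars (s : List Char) : Bool :=
  let rev := reverse_string_chars s
  if PySem.Chars.count s rev ≠ 0 then true else false

def create_palindrome3_chars (s : List Char) : List Char :=
  if is_palindrome_chars s then s
  else
    let st := (PySem.List.pyRange 0 (s.length : Int) 1).foldl
      (fun (acc : Option (List Char × Int)) idx =>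
        let s_pal := PySem.List.slice s none (some idx)
        if is_palindrome_chars s_pal then some (s_pal, idx) else acc) none
    match st with
    | some (palindrome_part, i) =>
        let tail := PySem.List.slice s (some i) none
        reverse_string_chars tail ++ palindrome_part ++ tail
    | none => []  -- unreachable: idx = 0 always stores the palindromic empty prefix (Python would NameError here)

def create_palindrome3 (string : String) : String :=
  String.ofList (create_palindrome3_chars string.toList)


-- ===== PORT B =====
-- the while loop of Source B: decrement i until string[:i] is a palindrome
def altFindChars (s : List Char) : Nat → Nat
  | 0 => 0
  | i+1 => if s.take (i+1) = (s.take (i+1)).reverse then i+1 else altFindChars s i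

def create_palindrome3_alt (string : String) : String :=
  let l := string.toList
  if l = l.reverse then string
  else
    let i := altFindChars l (l.length - 1)
    String.ofList ((l.drop i).reverse ++ l)

-- ===== PRECONDITION & SPEC =====
def Spec_create_palindrome3 (string : String) (out : String) : Prop := out = create_palindrome3_alt string
instance (string : String) (out : String) : Decidable (Spec_create_palindrome3 string out) := by unfold Spec_create_palindrome3; infer_instance

-- ===== CLAIM (what is proved, stated in full; the proofs are below) =====
def Claim_equal_create_palindrome3 : Prop := ∀ (string : String), Dom_create_palindrome3 string → Spec_create_palindrome3 string (create_palindrome3 string)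

-- ===== LEMMAS AND PROOFS =====

theorem reverse_string_chars_eq (s : List Char) : reverse_string_chars s = s.reverse := by
  unfold reverse_string_chars
  rw [← List.foldr_reverse]; simp

theorem count_go_of_short (sub : List Char) (fuel : Nat) :
    ∀ (l : List Char) (acc : Nat), l.length < sub.length →
      PySem.Chars.count.go sub fuel l acc = acc := by
  induction fuel with
  | zero => intro l acc _; cases l <;> simp [PySem.Chars.count.go]
  | succ n ih =>
      intro l acc h
      cases l with
      | nil => simp [PySem.Chars.count.go]
      | cons a t =>
          have hnp : sub.isPrefixOf (a :: t) = false := by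
            by_contra hc
            have : sub.isPrefixOf (a :: t) = true := by
              cases hb : sub.isPrefixOf (a :: t) <;> simp_all
            have := List.IsPrefix.length_le ((List.isPrefixOf_iff_prefix).1 this)
            omega
          simp only [PySem.Chars.count.go, hnp, Bool.false_eq_true, if_false]
          exact ih t acc (by simp at h ⊢; omega)

theorem is_palindrome_chars_eq (s : List Char) :
    is_palindrome_chars s = decide (s = s.reverse) := by
  unfold is_palindrome_chars
  rw [reverse_string_chars_eq]
  cases s with
  | nil => decide
  | cons a t =>
      by_cases h : (a :: t) = (a :: t).reverse
      · have hp : ((a :: t).reverse).isPrefixOf (a :: t) = true := by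
          rw [← h]; simp [List.isPrefixOf_iff_prefix]
        simp only [PySem.Chars.count]
        simp only [List.isEmpty_iff, List.reverse_eq_nil_iff, reduceCtorEq, if_false]
        simp only [List.length_cons, PySem.Chars.count.go, hp, if_true]
        have := count_go_of_short ((a :: t).reverse) t.length
          (List.drop ((a :: t).reverse).length (a :: t)) 1 (by simp)
        simp_all
      · have hnp : ((a :: t).reverse).isPrefixOf (a :: t) = false := by
          rw [Bool.eq_false_iff]
          intro hb
          have hpre := (List.isPrefixOf_iff_prefix).1 hb
          exact h ((List.IsPrefix.eq_of_length hpre (by simp)).symm)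
        simp only [PySem.Chars.count]
        simp only [List.isEmpty_iff, List.reverse_eq_nil_iff, reduceCtorEq, if_false]
        simp only [List.length_cons, PySem.Chars.count.go, hnp, Bool.false_eq_true, if_false]
        rw [count_go_of_short _ _ _ _ (by simp), decide_eq_false h]
        norm_num

theorem altFind_succ (s : List Char) (i : Nat) :
    altFindChars s (i+1)
      = if s.take (i+1) = (s.take (i+1)).reverse then i+1 else altFindChars s i := rfl

theorem loopA (s : List Char) : ∀ (n : Nat), 1 ≤ n →
    (PySem.List.pyRange 0 (n : Int) 1).foldl
      (fun (acc : Option (List Char × Int)) idx =>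
        let s_pal := PySem.List.slice s none (some idx)
        if is_palindrome_chars s_pal then some (s_pal, idx) else acc) none
    = some (s.take (altFindChars s (n-1)), ((altFindChars s (n-1) : Nat) : Int)) := by
  intro n hn
  induction n with
  | zero => omega
  | succ m ih =>
      have hsplit : PySem.List.pyRange 0 ((m+1 : Nat) : Int) 1
          = PySem.List.pyRange 0 ((m : Nat) : Int) 1 ++ [((m : Nat) : Int)] := by
        push_cast
        exact PySem.List.pyRange_one_succ_right (by positivity)
      rw [hsplit, List.foldl_append]
      simp only [List.foldl_cons, List.foldl_nil]
      rw [PySem.List.slice_to_natCast, is_palindrome_chars_eq]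
      cases m with
      | zero =>
          rw [PySem.List.pyRange_one_eq_nil (by norm_num)]
          simp [altFindChars]
      | succ k =>
          simp only [Nat.add_sub_cancel] at ih ⊢
          by_cases hp : s.take (k+1) = (s.take (k+1)).reverse
          · rw [decide_eq_true hp, if_pos rfl, altFind_succ, if_pos hp]
          · rw [decide_eq_false hp, altFind_succ, if_neg hp, if_neg (by simp)]
            exact ih (by omega)

theorem chars_eq (l : List Char) :
    create_palindrome3_chars l
      = if l = l.reverse then l
        else (l.drop (altFindChars l (l.length - 1))).reverse ++ l := by
  unfold create_palindrome3_chars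
  rw [is_palindrome_chars_eq]
  by_cases h : l = l.reverse
  · rw [decide_eq_true h, if_pos rfl, if_pos h]
  · have hne : l ≠ [] := by rintro rfl; exact h rfl
    have hlen : 1 ≤ l.length := List.length_pos_iff.mpr hne
    simp only [h, decide_false, Bool.false_eq_true, if_false]
    rw [loopA l l.length hlen]
    simp only []
    rw [PySem.List.slice_from_natCast, reverse_string_chars_eq]
    rw [List.append_assoc, List.take_append_drop]

-- ===== VERDICT (by name: the statement is the Claim_ definition above) =====
theorem create_palindrome3_spec : Claim_equal_create_palindrome3 := by
  intro string _
  unfold Spec_create_palindrome3 create_palindrome3 create_palindrome3_alt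
  by_cases h : string.toList = string.toList.reverse
  · rw [chars_eq, if_pos h, if_pos h]
    exact String.ofList_toList
  · rw [chars_eq, if_neg h, if_neg h]
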